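-- pv_equiv track=rewrite | github.com/andyscanzio/advent-of-code-2015 | day05.py | is_nice_part1
-- ===== SOURCE A (Python) =====
-- def is_nice_part1(word: str) -> bool:
--     if "ab" in word or "cd" in word or "pq" in word or "xy" in word:
--         return False
--     if sum(word.count(vowel) for vowel in "aeiou") > 2:
--         for idx, letter in enumerate(word[:-1]):
--             if word[idx + 1] == letter:
--                 return True
--     return False
-- ===== SOURCE B (Python) =====
-- def is_nice_part1(word: str) -> bool:
--     # Single left-to-right pass with running state (instead of A's many independent scans).
--     prev = None
--     vowels = 0
--     has_double = False
--     has_bad = False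
--     for c in word:
--         if c == "a" or c == "e" or c == "i" or c == "o" or c == "u":
--             vowels += 1
--         if prev is not None:
--             if c == prev:
--                 has_double = True
--             if (prev == "a" and c == "b") or (prev == "c" and c == "d") \
--                     or (prev == "p" and c == "q") or (prev == "x" and c == "y"):
--                 has_bad = True
--         prev = c
--     return (not has_bad) and vowels >= 3 and has_double
-- ===== Notes on version B (the rewrite author's own statement) =====
-- stated objective: alternative
-- what changed: Replaces A's ten separate scans of the string (four substring tests, five count() passes, plus an indexed enumerate loop with random-access word[idx+1]) by one single left-to-right state-machine pass keeping a previous character, a vowel counter and two flags.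
import Mathlib
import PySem

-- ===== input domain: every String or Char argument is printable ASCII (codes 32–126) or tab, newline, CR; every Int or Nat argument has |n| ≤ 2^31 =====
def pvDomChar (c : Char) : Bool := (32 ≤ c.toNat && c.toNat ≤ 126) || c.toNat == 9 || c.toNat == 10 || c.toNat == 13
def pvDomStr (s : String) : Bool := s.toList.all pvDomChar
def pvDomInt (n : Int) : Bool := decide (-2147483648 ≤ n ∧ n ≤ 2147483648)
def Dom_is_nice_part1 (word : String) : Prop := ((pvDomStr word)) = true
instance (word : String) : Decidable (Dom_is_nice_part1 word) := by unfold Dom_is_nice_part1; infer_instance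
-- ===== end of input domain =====

-- B replaces A's many independent scans (four substring tests, five count() passes, an
-- enumerate loop with random access) by one left-to-right state-machine pass; alternative, same O(n).


-- ===== PORT A =====
-- 'for idx, letter in enumerate(word[:-1]): if word[idx + 1] == letter: return True' (then fall through to False)
def pvLoopA (word : String) : List (Int × Char) → Bool
  | [] => false
  | (idx, letter) :: rest =>
    match PySem.Str.pyGet? word (idx + 1) with
    | some c => if c == letter then true else pvLoopA word rest
    | none => false   -- Python would raise IndexError here; unreachable for indices from enumerate(word[:-1])

def is_nice_part1 (word : String) : Bool :=
  if PySem.Str.isIn "ab" word || PySem.Str.isIn "cd" word || PySem.Str.isIn "pq" word || PySem.Str.isIn "xy" word then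
    false
  else if (("aeiou".toList.map (fun v => (PySem.Str.count word (String.ofList [v]) : Int))).sum > 2) then
    pvLoopA word (PySem.List.enumerate (PySem.Str.slice word none (some (-1))).toList 0)
  else
    false

-- ===== PORT B =====
def pvIsVowel (c : Char) : Bool := c == 'a' || c == 'e' || c == 'i' || c == 'o' || c == 'u'

def pvBadPair (p c : Char) : Bool :=
  (p == 'a' && c == 'b') || (p == 'c' && c == 'd') || (p == 'p' && c == 'q') || (p == 'x' && c == 'y')

-- one step of B's single pass: state = (prev, vowels, has_double, has_bad)
def pvStep (s : Option Char × Nat × Bool × Bool) (c : Char) : Option Char × Nat × Bool × Bool :=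
  (some c,
   (if pvIsVowel c then s.2.1 + 1 else s.2.1),
   (s.2.2.1 || (s.1 == some c)),
   (s.2.2.2 || (match s.1 with | some p => pvBadPair p c | none => false)))

def is_nice_part1_alt (word : String) : Bool :=
  let st := word.toList.foldl pvStep (none, 0, false, false)
  !st.2.2.2 && decide (3 ≤ st.2.1) && st.2.2.1

-- ===== PRECONDITION & SPEC =====
def Spec_is_nice_part1 (word : String) (out : Bool) : Prop := out = is_nice_part1_alt word
instance (word : String) (out : Bool) : Decidable (Spec_is_nice_part1 word out) := by unfold Spec_is_nice_part1; infer_instance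

-- ===== CLAIM (what is proved, stated in full; the proofs are below) =====
def Claim_equal_is_nice_part1 : Prop := ∀ (word : String), Dom_is_nice_part1 word → Spec_is_nice_part1 word (is_nice_part1 word)

-- ===== LEMMAS AND PROOFS =====

-- 'P holds of some adjacent pair' — the common characterisation both ports are reduced to
def adjAny (P : Char → Char → Bool) : List Char → Bool
  | x :: y :: r => P x y || adjAny P (y :: r)
  | _ => false

theorem adjAny_cons₂ (P : Char → Char → Bool) (x y : Char) (r : List Char) :
    adjAny P (x :: y :: r) = (P x y || adjAny P (y :: r)) := rfl

-- ---- A side: substring tests ----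
theorem isIn_pair (a b : Char) (cs : List Char) :
    PySem.Chars.isIn [a, b] cs = adjAny (fun x y => x == a && y == b) cs := by
  induction cs with
  | nil =>
    rw [Bool.eq_iff_iff, PySem.Chars.isIn_iff_infix]
    simp [adjAny]
  | cons x t ih =>
    rw [Bool.eq_iff_iff, PySem.Chars.isIn_iff_infix, List.infix_cons_iff]
    cases t with
    | nil => simp [adjAny, List.IsPrefix]
    | cons y r =>
      rw [adjAny_cons₂]
      rw [Bool.eq_iff_iff, PySem.Chars.isIn_iff_infix] at ih
      constructor
      · rintro (hpre | hinf)
        · rcases (List.cons_prefix_cons.mp hpre) with ⟨rfl, hpre2⟩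
          rcases (List.cons_prefix_cons.mp hpre2) with ⟨rfl, -⟩
          simp
        · simp [← ih, hinf]
      · intro h
        rcases Bool.or_eq_true _ _ |>.mp h with hxy | hrest
        · left
          simp only [Bool.and_eq_true, beq_iff_eq] at hxy
          rcases hxy with ⟨rfl, rfl⟩
          exact List.cons_prefix_cons.mpr ⟨rfl, List.cons_prefix_cons.mpr ⟨rfl, List.nil_prefix⟩⟩
        · right; exact ih.mpr hrest

theorem adjAny_or (P Q : Char → Char → Bool) (cs : List Char) :
    adjAny (fun x y => P x y || Q x y) cs = (adjAny P cs || adjAny Q cs) := by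
  induction cs with
  | nil => rfl
  | cons x t ih =>
    cases t with
    | nil => rfl
    | cons y r =>
      rw [adjAny_cons₂, adjAny_cons₂, adjAny_cons₂, ih]
      cases P x y <;> cases Q x y <;> simp

theorem bad_scan (cs : List Char) :
    (PySem.Chars.isIn ['a','b'] cs || PySem.Chars.isIn ['c','d'] cs
      || PySem.Chars.isIn ['p','q'] cs || PySem.Chars.isIn ['x','y'] cs)
      = adjAny pvBadPair cs := by
  have h : pvBadPair = fun x y =>
      (x == 'a' && y == 'b') || ((x == 'c' && y == 'd') || ((x == 'p' && y == 'q') || (x == 'x' && y == 'y'))) := by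
    funext x y; simp [pvBadPair, Bool.or_assoc]
  rw [h, adjAny_or, adjAny_or, adjAny_or, isIn_pair, isIn_pair, isIn_pair, isIn_pair, Bool.or_assoc, Bool.or_assoc]

-- ---- A side: vowel counting ----
theorem go_single (c : Char) : ∀ (fuel : Nat) (s : List Char) (acc : Nat), s.length ≤ fuel →
    PySem.Chars.count.go [c] fuel s acc = acc + s.count c := by
  intro fuel
  induction fuel with
  | zero => intro s acc h; rw [List.length_eq_zero_iff.mp (Nat.le_zero.mp h)]; simp [PySem.Chars.count.go]
  | succ n ih =>
    intro s acc h
    match s with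
    | [] => simp [PySem.Chars.count.go]
    | x :: t =>
      rw [PySem.Chars.count.go]
      by_cases hx : c = x
      · subst hx
        simp only [beq_self_eq_true, List.isPrefixOf_cons₂, List.isPrefixOf_nil_left, Bool.and_self, if_true]
        simp only [List.length_cons] at h
        rw [show List.drop [c].length (c :: t) = t by simp]
        rw [ih t (acc + 1) (by omega)]
        simp
        omega
      · have hpre : [c].isPrefixOf (x :: t) = false := by
          simp [List.isPrefixOf_cons₂, hx]
        simp only [hpre]
        simp only [List.length_cons] at h
        rw [ih t acc (by omega)]
        simp [Ne.symm hx]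

theorem count_single (cs : List Char) (c : Char) : PySem.Chars.count cs [c] = cs.count c := by
  rw [PySem.Chars.count]
  simp [go_single c cs.length cs 0 (le_refl _)]

theorem countP_vowels (cs : List Char) :
    cs.countP pvIsVowel = cs.count 'a' + cs.count 'e' + cs.count 'i' + cs.count 'o' + cs.count 'u' := by
  induction cs with
  | nil => simp
  | cons c t ih =>
    simp only [List.countP_cons, List.count_cons, ih]
    by_cases ha : c = 'a'
    · subst ha; simp [pvIsVowel]; omega
    by_cases he : c = 'e'
    · subst he; simp [pvIsVowel]; omega
    by_cases hi : c = 'i'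
    · subst hi; simp [pvIsVowel]; omega
    by_cases ho : c = 'o'
    · subst ho; simp [pvIsVowel]; omega
    by_cases hu : c = 'u'
    · subst hu; simp [pvIsVowel]; omega
    · simp [pvIsVowel, ha, he, hi, ho, hu]

-- ---- A side: the double-letter loop ----
theorem loopA_drop (word : String) : ∀ (m k : Nat), word.toList.length - k = m →
    pvLoopA word (PySem.List.enumerate ((word.toList.dropLast).drop k) (k : Int))
      = adjAny (fun x y => x == y) (word.toList.drop k) := by
  intro m
  induction m with
  | zero =>
    intro k hk
    have h1 : (word.toList.dropLast).drop k = [] := by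
      apply List.drop_eq_nil_of_le; rw [List.length_dropLast]; omega
    rw [h1]
    have h2 : adjAny (fun x y => x == y) (word.toList.drop k) = false := by
      rcases h : word.toList.drop k with _ | ⟨x, _ | ⟨y, r⟩⟩
      · rfl
      · rfl
      · exfalso
        have := congrArg List.length h
        rw [List.length_drop, List.length_cons, List.length_cons] at this
        omega
    rw [h2]; rfl
  | succ n ih =>
    intro k hk
    by_cases hlt : k + 1 < word.toList.length
    · have hk1 : k < word.toList.dropLast.length := by rw [List.length_dropLast]; omega
      have hda : word.toList.dropLast.drop k = word.toList.dropLast[k] :: word.toList.dropLast.drop (k + 1) :=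
        List.drop_eq_getElem_cons hk1
      rw [hda, PySem.List.enumerate_cons, pvLoopA]
      have hcast : ((k : Int) + 1) = ((k + 1 : Nat) : Int) := by push_cast; ring_nf
      rw [hcast, PySem.Str.pyGet?_natCast]
      have hget : word.toList[k + 1]? = some (word.toList[k + 1]'hlt) := List.getElem?_eq_getElem hlt
      rw [hget]
      have hdk : word.toList.dropLast[k] = word.toList[k]'(by omega) := List.getElem_dropLast hk1
      have hd1 : word.toList.drop k = word.toList[k]'(by omega) :: word.toList.drop (k + 1) :=
        List.drop_eq_getElem_cons (by omega)
      have hd2 : word.toList.drop (k + 1) = word.toList[k + 1]'hlt :: word.toList.drop (k + 2) :=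
        List.drop_eq_getElem_cons hlt
      rw [hd1, hd2, adjAny_cons₂, ← hd2, ih (k + 1) (by omega), hdk]
      rcases hbeq : (word.toList[k]'(by omega) == word.toList[k + 1]'hlt) with _ | _
      · have : (word.toList[k + 1]'hlt == word.toList[k]'(by omega)) = false := by
          simp only [beq_eq_false_iff_ne] at *; exact Ne.symm hbeq
        simp [this]
      · have : (word.toList[k + 1]'hlt == word.toList[k]'(by omega)) = true := by
          simp only [beq_iff_eq] at *; exact hbeq.symm
        simp [this]
    · -- k ≥ len - 1 : loop body empty on both sides
      have h1 : (word.toList.dropLast).drop k = [] := by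
        apply List.drop_eq_nil_of_le; rw [List.length_dropLast]; omega
      rw [h1]
      have h2 : adjAny (fun x y => x == y) (word.toList.drop k) = false := by
        rcases h : word.toList.drop k with _ | ⟨x, _ | ⟨y, r⟩⟩
        · rfl
        · rfl
        · exfalso
          have := congrArg List.length h
          rw [List.length_drop, List.length_cons, List.length_cons] at this
          omega
      rw [h2]; rfl

-- ---- B side: the fold invariant ----
theorem foldl_step (cs : List Char) : ∀ (p : Char) (v : Nat) (d b : Bool),
    cs.foldl pvStep (some p, v, d, b) =
      (some ((p :: cs).getLast (List.cons_ne_nil p cs)),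
       v + cs.countP pvIsVowel,
       d || adjAny (fun x y => x == y) (p :: cs),
       b || adjAny pvBadPair (p :: cs)) := by
  induction cs with
  | nil => intro p v d b; simp [adjAny]
  | cons c t ih =>
    intro p v d b
    rw [List.foldl_cons]
    have hstep : pvStep (some p, v, d, b) c
        = (some c, (if pvIsVowel c then v + 1 else v), (d || (p == c)), (b || pvBadPair p c)) := by
      simp [pvStep]
    rw [hstep, ih c]
    have h1 : ((p :: c :: t).getLast (List.cons_ne_nil p (c :: t)))
        = ((c :: t).getLast (List.cons_ne_nil c t)) := List.getLast_cons (List.cons_ne_nil c t)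
    have h2 : (if pvIsVowel c then v + 1 else v) + t.countP pvIsVowel
        = v + (c :: t).countP pvIsVowel := by
      rw [List.countP_cons]; split_ifs with h <;> omega
    have h3 : ((d || (p == c)) || adjAny (fun x y => x == y) (c :: t))
        = (d || adjAny (fun x y => x == y) (p :: c :: t)) := by
      rw [adjAny_cons₂, Bool.or_assoc]
    have h4 : ((b || pvBadPair p c) || adjAny pvBadPair (c :: t))
        = (b || adjAny pvBadPair (p :: c :: t)) := by
      rw [adjAny_cons₂, Bool.or_assoc]
    rw [h2, h3, h4, h1]

-- the canonical form of B
theorem alt_canon (word : String) :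
    is_nice_part1_alt word =
      (!(adjAny pvBadPair word.toList) && decide (3 ≤ word.toList.countP pvIsVowel)
        && adjAny (fun x y => x == y) word.toList) := by
  unfold is_nice_part1_alt
  rcases h : word.toList with _ | ⟨c, t⟩
  · simp [adjAny]
  · rw [List.foldl_cons]
    have hstep : pvStep (none, 0, false, false) c
        = (some c, (if pvIsVowel c then 0 + 1 else 0), false, false) := by
      simp [pvStep]
    rw [hstep, foldl_step t c]
    have h2 : (if pvIsVowel c then 0 + 1 else 0) + t.countP pvIsVowel = (c :: t).countP pvIsVowel := by
      rw [List.countP_cons]; split_ifs with hv <;> omega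
    simp only [h2, Bool.false_or]

-- ===== VERDICT (by name: the statement is the Claim_ definition above) =====
theorem is_nice_part1_spec : Claim_equal_is_nice_part1 := by
  intro word _
  unfold Spec_is_nice_part1
  rw [alt_canon]
  unfold is_nice_part1
  have hbad : (PySem.Str.isIn "ab" word || PySem.Str.isIn "cd" word
      || PySem.Str.isIn "pq" word || PySem.Str.isIn "xy" word) = adjAny pvBadPair word.toList := by
    simp only [PySem.Str.isIn_eq]
    rw [show ("ab" : String).toList = ['a','b'] from rfl,
        show ("cd" : String).toList = ['c','d'] from rfl,
        show ("pq" : String).toList = ['p','q'] from rfl,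
        show ("xy" : String).toList = ['x','y'] from rfl]
    exact bad_scan word.toList
  have hvow : (("aeiou".toList.map (fun v => (PySem.Str.count word (String.ofList [v]) : Int))).sum > 2)
      ↔ (3 ≤ word.toList.countP pvIsVowel) := by
    rw [show "aeiou".toList = ['a','e','i','o','u'] from rfl]
    simp only [List.map_cons, List.map_nil, List.sum_cons, List.sum_nil, PySem.Str.count_eq]
    rw [show (String.ofList ['a']).toList = ['a'] from rfl,
        show (String.ofList ['e']).toList = ['e'] from rfl,
        show (String.ofList ['i']).toList = ['i'] from rfl,
        show (String.ofList ['o']).toList = ['o'] from rfl,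
        show (String.ofList ['u']).toList = ['u'] from rfl]
    rw [count_single, count_single, count_single, count_single, count_single, countP_vowels]
    omega
  have hdbl : pvLoopA word (PySem.List.enumerate (PySem.Str.slice word none (some (-1))).toList 0)
      = adjAny (fun x y => x == y) word.toList := by
    have h0 := loopA_drop word word.toList.length 0 rfl
    simp only [List.drop_zero, Nat.cast_zero] at h0
    rw [show (PySem.Str.slice word none (some (-1))).toList = word.toList.dropLast from
      PySem.Str.slice_to_neg_one word]
    exact h0
  rcases h1 : adjAny pvBadPair word.toList with _ | _
  · rw [hbad, h1]
    simp only [Bool.false_eq_true, if_false, Bool.not_false, Bool.true_and]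
    split_ifs with hv
    · rw [hdbl]
      have : decide (3 ≤ word.toList.countP pvIsVowel) = true := by
        rw [decide_eq_true_eq]; exact hvow.mp hv
      rw [this, Bool.true_and]
    · have : decide (3 ≤ word.toList.countP pvIsVowel) = false := by
        rw [decide_eq_false_iff_not]; intro hc; exact hv (hvow.mpr hc)
      rw [this, Bool.false_and]
  · rw [hbad, h1]
    simp
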